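-- pv_equiv track=rewrite | github.com/NKaty/AdventOfCode | 2018/day05/task2.py | find_resulting_polymer
-- ===== SOURCE A (Python) =====
-- from collections import deque
--
-- def find_resulting_polymer(polymer, removed):
--     stack = deque()
--     for unit in polymer:
--         if unit in removed:
--             continue
--         if len(stack) and unit == stack[-1].swapcase():
--             stack.pop()
--         else:
--             stack.append(unit)
--     return len(stack)
-- ===== SOURCE B (Python) =====
-- def _one_pass(units):
--     out = []
--     i = 0
--     n = len(units)
--     while i < n:
--         if i + 1 < n and units[i + 1] == units[i].swapcase():
--             i += 2
--         else:
--             out.append(units[i])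
--             i += 1
--     return out
--
-- def find_resulting_polymer(polymer, removed):
--     units = [u for u in polymer if u not in removed]
--     while True:
--         reduced = _one_pass(units)
--         if len(reduced) == len(units):
--             return len(units)
--         units = reduced
-- ===== Notes on version B (the rewrite author's own statement) =====
-- stated objective: alternative
-- what changed: Replaces A's single stack pass with repeated left-to-right scans over the pre-filtered sequence, each scan dropping every adjacent reacting pair, iterated until a scan removes nothing; correctness rests on confluence of the reduction.
import Mathlib
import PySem

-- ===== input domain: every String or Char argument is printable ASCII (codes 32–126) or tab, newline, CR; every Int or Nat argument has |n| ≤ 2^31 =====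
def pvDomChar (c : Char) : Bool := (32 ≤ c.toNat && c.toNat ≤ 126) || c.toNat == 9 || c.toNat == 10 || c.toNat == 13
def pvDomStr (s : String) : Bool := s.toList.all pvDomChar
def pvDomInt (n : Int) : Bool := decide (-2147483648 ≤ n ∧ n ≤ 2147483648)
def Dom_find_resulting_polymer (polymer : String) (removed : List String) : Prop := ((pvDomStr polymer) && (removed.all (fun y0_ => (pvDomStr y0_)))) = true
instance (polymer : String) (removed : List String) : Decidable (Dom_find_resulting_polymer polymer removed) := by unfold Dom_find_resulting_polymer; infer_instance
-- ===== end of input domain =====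

-- B replaces A's single stack pass with repeated adjacent-pair-cancelling scans of the
-- pre-filtered sequence until a scan removes nothing (objective: alternative algorithm).

-- ===== PORT A =====
-- str.swapcase() restricted to the ASCII domain (exact there; both Pythons call it)
def pySwapcase (c : Char) : Char :=
  if 97 ≤ c.toNat ∧ c.toNat ≤ 122 then Char.ofNat (c.toNat - 32)
  else if 65 ≤ c.toNat ∧ c.toNat ≤ 90 then Char.ofNat (c.toNat + 32)
  else c

-- one iteration of A's for-loop body after the `continue` filter
-- (the deque with its top at the right is represented top-first)
def pyStep (stack : List Char) (unit : Char) : List Char :=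
  match stack with
  | top :: rest => if unit = pySwapcase top then rest else unit :: top :: rest
  | [] => [unit]

def find_resulting_polymer (polymer : String) (removed : List String) : Int :=
  ((polymer.toList.foldl (fun stack unit =>
      if removed.contains (String.mk [unit]) then stack
      else pyStep stack unit) []).length : Int)

-- ===== PORT B =====
-- one left-to-right scan dropping each adjacent reacting pair (B's _one_pass)
def onePass : List Char → List Char
  | [] => []
  | [x] => [x]
  | x :: y :: rest => if y = pySwapcase x then onePass rest else x :: onePass (y :: rest)

theorem onePass_length_le : ∀ xs : List Char, (onePass xs).length ≤ xs.length
  | [] => by simp [onePass]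
  | [x] => by simp [onePass]
  | x :: y :: rest => by
    simp only [onePass]
    split
    · have := onePass_length_le rest; simp; omega
    · have := onePass_length_le (y :: rest); simp at this ⊢; omega

-- B's while-loop: rescan until a pass removes nothing
def reduceLoop (units : List Char) : List Char :=
  if (onePass units).length = units.length then units
  else reduceLoop (onePass units)
termination_by units.length
decreasing_by have := onePass_length_le units; omega

def find_resulting_polymer_alt (polymer : String) (removed : List String) : Int :=
  ((reduceLoop (polymer.toList.filter
      (fun u => !(removed.contains (String.mk [u]))))).length : Int)

-- ===== PRECONDITION & SPEC =====
def Spec_find_resulting_polymer (polymer : String) (removed : List String) (out : Int) : Prop := out = find_resulting_polymer_alt polymer removed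
instance (polymer : String) (removed : List String) (out : Int) : Decidable (Spec_find_resulting_polymer polymer removed out) := by unfold Spec_find_resulting_polymer; infer_instance

-- ===== CLAIM (what is proved, stated in full; the proofs are below) =====
def Claim_equal_find_resulting_polymer : Prop := ∀ (polymer : String) (removed : List String), Dom_find_resulting_polymer polymer removed → Spec_find_resulting_polymer polymer removed (find_resulting_polymer polymer removed)

-- ===== LEMMAS AND PROOFS =====

theorem toNat_ofNat_lt (n : ℕ) (h : n < 55296) : (Char.ofNat n).toNat = n := by
  unfold Char.ofNat
  rw [dif_pos (by omega)]
  simp [Char.ofNatAux, Char.toNat, UInt32.toNat_ofNatLT]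

theorem pySwapcase_invol (c : Char) : pySwapcase (pySwapcase c) = c := by
  unfold pySwapcase
  by_cases h1 : 97 ≤ c.toNat ∧ c.toNat ≤ 122
  · rw [if_pos h1]
    rw [toNat_ofNat_lt _ (by omega), if_neg (by omega), if_pos (by omega)]
    have : c.toNat - 32 + 32 = c.toNat := by omega
    rw [this, Char.ofNat_toNat]
  · rw [if_neg h1]
    by_cases h2 : 65 ≤ c.toNat ∧ c.toNat ≤ 90
    · rw [if_pos h2, toNat_ofNat_lt _ (by omega), if_pos (by omega)]
      have : c.toNat + 32 - 32 = c.toNat := by omega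
      rw [this, Char.ofNat_toNat]
    · rw [if_neg h2, if_neg h1, if_neg h2]

-- stack states (top first): no unit reacts with the one below it
def StackInv (s : List Char) : Prop := List.IsChain (fun a b => a ≠ pySwapcase b) s

-- strings (reading order): no unit reacts with its predecessor
def StrIrr (xs : List Char) : Prop := List.IsChain (fun a b => b ≠ pySwapcase a) xs

theorem inv_pyStep {s : List Char} (u : Char) (hs : StackInv s) : StackInv (pyStep s u) := by
  unfold StackInv pyStep
  match s, hs with
  | [], _ => simp
  | top :: rest, hs =>
    by_cases h : u = pySwapcase top
    · simp only [if_pos h]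
      exact hs.tail
    · simp only [if_neg h]
      exact List.isChain_cons_cons.mpr ⟨h, hs⟩

theorem two_step {s : List Char} (a : Char) (hs : StackInv s) :
    pyStep (pyStep s a) (pySwapcase a) = s := by
  match s, hs with
  | [], _ => simp [pyStep]
  | top :: rest, hs =>
    by_cases h : a = pySwapcase top
    · simp only [pyStep, if_pos h]
      match rest, hs with
      | [], _ => simp [h, pySwapcase_invol]
      | t' :: r', hs =>
        have hne : top ≠ pySwapcase t' := (List.isChain_cons_cons.mp hs).1
        simp [h, pySwapcase_invol, hne]
    · simp [pyStep, if_neg h]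

theorem foldl_onePass : ∀ (xs s : List Char), StackInv s →
    List.foldl pyStep s (onePass xs) = List.foldl pyStep s xs := by
  intro xs
  induction xs using onePass.induct with
  | case1 => intro s _; rfl
  | case2 x => intro s _; rfl
  | case3 x rest ih =>
    intro s hs
    simp only [onePass, if_true]
    rw [ih s hs, List.foldl_cons, List.foldl_cons, two_step x hs]
  | case4 x y rest h ih =>
    intro s hs
    simp only [onePass, if_neg h, List.foldl_cons]
    exact ih (pyStep s x) (inv_pyStep x hs)

theorem fix_irr : ∀ xs : List Char, (onePass xs).length = xs.length → StrIrr xs := by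
  intro xs
  induction xs using onePass.induct with
  | case1 => intro _; simp [StrIrr]
  | case2 x => intro _; simp [StrIrr]
  | case3 x rest ih =>
    intro hlen
    exfalso
    have := onePass_length_le rest
    simp only [onePass, if_true, List.length_cons] at hlen
    omega
  | case4 x y rest h ih =>
    intro hlen
    simp only [onePass, if_neg h, List.length_cons] at hlen
    have : (onePass (y :: rest)).length = (y :: rest).length := by
      simp only [List.length_cons]; omega
    exact List.isChain_cons_cons.mpr ⟨h, ih this⟩

theorem irr_foldl : ∀ (xs s : List Char), StackInv s → StrIrr xs →
    (∀ t x, s.head? = some t → xs.head? = some x → x ≠ pySwapcase t) →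
    List.foldl pyStep s xs = xs.reverse ++ s := by
  intro xs
  induction xs with
  | nil => intro s _ _ _; simp
  | cons x rest ih =>
    intro s hs hirr hside
    have hstep : pyStep s x = x :: s := by
      match s with
      | [] => rfl
      | t :: s' =>
        have : x ≠ pySwapcase t := hside t x rfl rfl
        simp [pyStep, this]
    have hinv' : StackInv (x :: s) := by
      rw [← hstep]; exact inv_pyStep x hs
    have hside' : ∀ t z, (x :: s).head? = some t → rest.head? = some z →
        z ≠ pySwapcase t := by
      intro t z ht hz
      simp at ht
      subst ht
      match rest, hz with
      | z' :: r', rfl => exact (List.isChain_cons_cons.mp hirr).1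
    rw [List.foldl_cons, hstep, ih (x :: s) hinv' hirr.tail hside']
    simp

theorem reduceLoop_foldl (xs : List Char) :
    List.foldl pyStep [] (reduceLoop xs) = List.foldl pyStep [] xs := by
  induction xs using reduceLoop.induct with
  | case1 xs h =>
    rw [reduceLoop, if_pos h]
  | case2 xs h ih =>
    rw [reduceLoop, if_neg h, ih, foldl_onePass xs [] (by simp [StackInv])]

theorem reduceLoop_fix (xs : List Char) :
    (onePass (reduceLoop xs)).length = (reduceLoop xs).length := by
  induction xs using reduceLoop.induct with
  | case1 xs h => rwa [reduceLoop, if_pos h]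
  | case2 xs h ih => rwa [reduceLoop, if_neg h]

theorem stack_length_eq (l : List Char) :
    (List.foldl pyStep [] l).length = (reduceLoop l).length := by
  have hirr : StrIrr (reduceLoop l) := fix_irr _ (reduceLoop_fix l)
  have h1 : List.foldl pyStep [] (reduceLoop l) = (reduceLoop l).reverse ++ [] :=
    irr_foldl _ _ (by simp [StackInv]) hirr (by simp)
  have h2 := reduceLoop_foldl l
  rw [← h2, h1]; simp

theorem foldl_skip_eq_filter (p : Char → Bool) :
    ∀ (xs s : List Char),
    List.foldl (fun st u => if p u then st else pyStep st u) s xs =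
      List.foldl pyStep s (xs.filter (fun u => !(p u))) := by
  intro xs
  induction xs with
  | nil => intro s; rfl
  | cons x rest ih =>
    intro s
    by_cases h : p x <;> simp [h, ih]

-- ===== VERDICT (by name: the statement is the Claim_ definition above) =====
theorem find_resulting_polymer_spec : Claim_equal_find_resulting_polymer := by
  intro polymer removed _
  unfold Spec_find_resulting_polymer find_resulting_polymer find_resulting_polymer_alt
  rw [foldl_skip_eq_filter]
  exact congrArg (Int.ofNat) (stack_length_eq _)
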